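-- pv_equiv track=rewrite | github.com/josestg/Matriks-Bunga | matriks_bunga.py | flower
-- ===== SOURCE A (Python) =====
-- def flower(M,k,l):
--
--     row, col =  len(M),len(M[0])
--     k_row,l_col = row*k, col*l
--
--     # Membuat matriks baru R berukuran km*kn
--     result = []
--     for i in range(k_row):
--         result.append([None]*l_col)
--
--     for i in range(row):
--         for j in range(col):
--             # Memekarkan setiap matrik i,j ke i+k dan j+k
--             for x in range(i*k , (i+1)*k ):
--                 for y in range(j*l , (j+1)*l):
--                     result[x][y] = M[i][j]
--
--     return result
-- ===== SOURCE B (Python) =====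
-- def flower(M, k, l):
--     # Build the expanded matrix row by row: for every source row append k fresh
--     # expanded copies; no preallocation, no block-index arithmetic.
--     col = len(M[0])
--     out = []
--     for src in M:
--         for _ in range(k):
--             out.append([x for j in range(col) for x in [src[j]] * l])
--     return out
-- ===== Notes on version B (the rewrite author's own statement) =====
-- stated objective: simpler
-- what changed: Instead of preallocating a k*rows x l*cols grid of None and scatter-writing each element into its block with four nested index loops, B builds the output row-wise: for each source row it appends k freshly built expanded rows (each entry repeated l times).
-- outside the precondition, e.g. on flower([[1, 2], [3]], 1, 0): A returns [[], []], B raises IndexError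
import Mathlib
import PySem

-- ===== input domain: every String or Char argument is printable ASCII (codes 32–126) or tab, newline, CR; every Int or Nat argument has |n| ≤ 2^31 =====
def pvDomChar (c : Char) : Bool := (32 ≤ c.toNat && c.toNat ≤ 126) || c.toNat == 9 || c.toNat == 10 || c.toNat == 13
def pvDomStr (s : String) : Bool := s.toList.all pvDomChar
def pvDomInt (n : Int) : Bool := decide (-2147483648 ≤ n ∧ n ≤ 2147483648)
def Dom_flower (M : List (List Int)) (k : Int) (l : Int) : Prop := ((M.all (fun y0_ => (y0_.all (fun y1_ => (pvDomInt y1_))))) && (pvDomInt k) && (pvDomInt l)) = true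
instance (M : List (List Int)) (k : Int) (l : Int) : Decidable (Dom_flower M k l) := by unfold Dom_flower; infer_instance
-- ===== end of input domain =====

-- B replaces A's preallocate-then-scatter grid fill by a row-wise build (expand each
-- source row once, append k copies); same cost, simpler decomposition.


-- ===== PORT A =====
-- Literal port of A. '[None]*l_col' is ported with placeholder 0: under Pre_ every cell
-- is overwritten (or lies in an empty row) before return, so the placeholder is never
-- visible in the result. 'M[i]'/'M[i][j]'/'result[x][y] = v' use pyGetD/pySetD; their
-- defaults are never reached under Pre_ (indices stay in range there).
def flower (M : List (List Int)) (k : Int) (l : Int) : List (List Int) :=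
  let row : Int := M.length
  let col : Int := ((PySem.List.pyGet? M 0).getD []).length  -- len(M[0]); IndexError on M = [] is excluded by Pre_
  let k_row : Int := row * k
  let l_col : Int := col * l
  let result : List (List Int) :=
    (PySem.List.pyRange 0 k_row 1).foldl
      (fun res _ => res ++ [List.replicate l_col.toNat 0]) []
  (PySem.List.pyRange 0 row 1).foldl (fun res i =>
    (PySem.List.pyRange 0 col 1).foldl (fun res j =>
      (PySem.List.pyRange (i * k) ((i + 1) * k) 1).foldl (fun res x =>
        (PySem.List.pyRange (j * l) ((j + 1) * l) 1).foldl (fun res y =>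
          PySem.List.pySetD res x
            (PySem.List.pySetD (PySem.List.pyGetD res x [])
              y
              (PySem.List.pyGetD (PySem.List.pyGetD M i []) j 0)))
          res)
        res)
      res)
    result

-- ===== PORT B =====
-- Literal port of Source B: one pass over M, appending k freshly expanded copies of each row.
-- The comprehension '[x for j in range(col) for x in [src[j]] * l]' is ported as flatMap.
def flower_alt (M : List (List Int)) (k : Int) (l : Int) : List (List Int) :=
  let col : Int := ((PySem.List.pyGet? M 0).getD []).length  -- len(M[0])
  M.foldl (fun out src =>
    (PySem.List.pyRange 0 k 1).foldl (fun out _ =>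
      out ++ [(PySem.List.pyRange 0 col 1).flatMap
        (fun j => List.replicate l.toNat (PySem.List.pyGetD src j 0))]) out) []

-- ===== PRECONDITION & SPEC =====
-- Pre_ excludes the empty matrix (A raises IndexError on len(M[0])) and, when k > 0,
-- matrices with a row shorter than the first row: there A raises IndexError if l is also
-- positive, and if l ≤ 0 A returns empty rows only because its write loops never touch the
-- short row, while B (which reads every row up to the first row's width whenever it emits
-- rows) raises IndexError.
def Pre_flower (M : List (List Int)) (k : Int) (l : Int) : Prop :=
  M ≠ [] ∧ (0 < k → ∀ r ∈ M, (M.headD []).length ≤ r.length)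
instance (M : List (List Int)) (k : Int) (l : Int) : Decidable (Pre_flower M k l) := by
  unfold Pre_flower; infer_instance

def pvWitness_flower : List (List Int) × Int × Int := ([[1, 2], [3, 4]], 2, 3)

def Spec_flower (M : List (List Int)) (k : Int) (l : Int) (out : List (List Int)) : Prop := out = flower_alt M k l
instance (M : List (List Int)) (k : Int) (l : Int) (out : List (List Int)) : Decidable (Spec_flower M k l out) := by unfold Spec_flower; infer_instance

-- ===== CLAIM (what is proved, stated in full; the proofs are below) =====
def Claim_equal_flower : Prop := ∀ (M : List (List Int)) (k : Int) (l : Int), Dom_flower M k l → Pre_flower M k l → Spec_flower M k l (flower M k l)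

-- ===== LEMMAS AND PROOFS =====

theorem foldl_row_factor (x : Nat) (v : Int) (idx : Nat → Nat) :
    ∀ (ys : List Nat) (g : List (List Int)),
    ys.foldl (fun g y => g.set x ((g.getD x []).set (idx y) v)) g
      = g.set x (ys.foldl (fun r y => r.set (idx y) v) (g.getD x [])) := by
  intro ys
  induction ys with
  | nil =>
    intro g
    simp only [List.foldl_nil]
    by_cases h : x < g.length
    · rw [List.getD_eq_getElem g [] h]; simp
    · rw [List.set_eq_of_length_le (by omega)]
  | cons y ys ih =>
    intro g
    simp only [List.foldl_cons]
    rw [ih]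
    by_cases h : x < g.length
    · rw [List.set_set]
      congr 1
      rw [List.getD_eq_getElem?_getD, List.getElem?_set_self (by simpa using h)]
      rw [List.getD_eq_getElem g [] h]
      rfl
    · have hd : g.getD x [] = [] := List.getD_eq_default _ _ (by omega)
      have hg' : g.set x ((g.getD x []).set (idx y) v) = g :=
        List.set_eq_of_length_le (by omega)
      rw [hg', hd]
      simp

theorem foldl_set_range (v : Int) :
    ∀ (n : Nat) (r : List Int) (a : Nat), a + n ≤ r.length →
    (List.range n).foldl (fun r s => r.set (a + s) v) r
      = r.take a ++ List.replicate n v ++ r.drop (a + n) := by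
  intro n
  induction n with
  | zero => intro r a h; simp [List.take_append_drop]
  | succ n ih =>
    intro r a h
    rw [List.range_succ, List.foldl_append, ih r a (by omega)]
    simp only [List.foldl_cons, List.foldl_nil]
    have hta : (r.take a).length = a := List.length_take_of_le (by omega)
    rw [List.append_assoc, List.set_append_right _ _ (by rw [hta]; omega)]
    rw [show a + n - (r.take a).length = n from by rw [hta]; omega]
    rw [List.set_append_right _ _ (by simp)]
    rw [show n - (List.replicate n v).length = 0 from by simp]
    rw [List.drop_eq_getElem_cons (by omega)]
    simp only [List.set_cons_zero]
    rw [show a + n + 1 = a + (n+1) from by omega]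
    simp [List.replicate_succ', List.append_assoc]

-- L3: a fold that rewrites rows a, a+1, …, a+n-1 each by f
theorem foldl_map_block (f : List Int → List Int) :
    ∀ (n : Nat) (g : List (List Int)) (a : Nat), a + n ≤ g.length →
    (List.range n).foldl (fun g t => g.set (a + t) (f (g.getD (a + t) []))) g
      = g.take a ++ ((g.drop a).take n).map f ++ g.drop (a + n) := by
  intro n
  induction n with
  | zero => intro g a h; simp [List.take_append_drop]
  | succ n ih =>
    intro g a h
    rw [List.range_succ, List.foldl_append, ih g a (by omega)]
    simp only [List.foldl_cons, List.foldl_nil]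
    have hta : (g.take a).length = a := List.length_take_of_le (by omega)
    have hmap : (((g.drop a).take n).map f).length = n := by
      simp [List.length_take, List.length_drop]; omega
    have hget : (g.take a ++ ((g.drop a).take n).map f ++ g.drop (a + n)).getD (a + n) [] = g[a + n]'(by omega) := by
      rw [List.append_assoc, List.getD_append_right _ _ _ _ (by rw [hta]; omega)]
      rw [List.getD_append_right _ _ _ _ (by rw [hmap]; rw [hta]; omega)]
      rw [hta, hmap, show a + n - a - n = 0 from by omega]
      rw [List.getD_eq_getElem _ _ (by simp; omega)]
      simp [List.getElem_drop]
    rw [hget]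
    rw [List.append_assoc, List.set_append_right _ _ (by rw [hta]; omega)]
    rw [show a + n - (g.take a).length = n from by rw [hta]; omega]
    rw [List.set_append_right _ _ hmap.le]
    rw [show n - (((g.drop a).take n).map f).length = 0 from by rw [hmap]; omega]
    rw [List.drop_eq_getElem_cons (show a + n < g.length from by omega)]
    simp only [List.set_cons_zero]
    have htake : (g.drop a).take (n+1) = (g.drop a).take n ++ [g[a + n]'(by omega)] := by
      rw [List.take_add_one]
      congr 1
      rw [List.getElem?_eq_getElem (by simp; omega)]
      simp [List.getElem_drop]
    rw [htake]
    simp [List.append_assoc, show a + n + 1 = a + (n+1) from rfl]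

-- length of a partial expanded row
theorem flat_rep_length (lN : Nat) (vf : Nat → Int) (d : Nat) :
    (((List.range d).map (fun j => List.replicate lN (vf j))).flatten).length = d * lN := by
  induction d with
  | zero => simp
  | succ d ih => rw [List.range_succ]; simp [ih, Nat.succ_mul]

-- L5: the j-loop builds the expanded row out of the blank row
theorem row_build (lN : Nat) (vf : Nat → Int) (c : Nat) :
    (List.range c).foldl
      (fun r j => (List.range lN).foldl (fun r s => r.set (j * lN + s) (vf j)) r)
      (List.replicate (c * lN) 0)
    = ((List.range c).map (fun j => List.replicate lN (vf j))).flatten := by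
  suffices h : ∀ d, d ≤ c →
      (List.range d).foldl
        (fun r j => (List.range lN).foldl (fun r s => r.set (j * lN + s) (vf j)) r)
        (List.replicate (c * lN) 0)
      = ((List.range d).map (fun j => List.replicate lN (vf j))).flatten
          ++ List.replicate ((c - d) * lN) 0 by
    have := h c le_rfl
    simpa using this
  intro d hd
  induction d with
  | zero => simp
  | succ d ih =>
    rw [List.range_succ, List.foldl_append, ih (by omega)]
    simp only [List.foldl_cons, List.foldl_nil]
    have hflen : (((List.range d).map (fun j => List.replicate lN (vf j))).flatten).length = d * lN :=
      flat_rep_length lN vf d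
    have hlen : (((List.range d).map (fun j => List.replicate lN (vf j))).flatten
        ++ List.replicate ((c - d) * lN) 0).length = c * lN := by
      simp [hflen]
      have : d * lN + (c - d) * lN = c * lN := by
        rw [← Nat.add_mul]; congr 1; omega
      omega
    rw [foldl_set_range _ lN _ (d * lN) (by rw [hlen, ← Nat.succ_mul]; exact Nat.mul_le_mul_right _ hd)]
    rw [List.take_append_of_le_length (by rw [hflen])]
    rw [List.take_of_length_le (by rw [hflen])]
    rw [List.drop_append, List.drop_eq_nil_of_le (by rw [hflen]; omega), hflen]
    rw [show d * lN + lN - d * lN = lN from by omega, List.drop_replicate]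
    have harith : (c - d) * lN - lN = (c - (d+1)) * lN := by
      have hcd : c - d = (c - (d+1)) + 1 := by omega
      rw [hcd, Nat.add_mul]; omega
    rw [harith]
    simp [List.append_assoc]

-- L6: the j-loop acts uniformly on the k identical rows of the current block
theorem grid_fold (kN : Nat) (pre rest : List (List Int)) (step : Nat → List Int → List Int) :
    ∀ (js : List Nat) (r : List Int),
    js.foldl
      (fun g j => (List.range kN).foldl
        (fun g t => g.set (pre.length + t) (step j (g.getD (pre.length + t) []))) g)
      (pre ++ List.replicate kN r ++ rest)
    = pre ++ List.replicate kN (js.foldl (fun r j => step j r) r) ++ rest := by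
  intro js
  induction js with
  | nil => intro r; simp
  | cons j js ih =>
    intro r
    simp only [List.foldl_cons]
    rw [foldl_map_block (step j) kN (pre ++ List.replicate kN r ++ rest) pre.length
        (by simp)]
    have h1 : (pre ++ List.replicate kN r ++ rest).take pre.length = pre := by
      rw [List.append_assoc, List.take_append_of_le_length le_rfl, List.take_length]
    have h2 : (((pre ++ List.replicate kN r ++ rest).drop pre.length).take kN)
        = List.replicate kN r := by
      rw [List.append_assoc, List.drop_left]
      rw [List.take_append_of_le_length (by simp), List.take_replicate, Nat.min_self]
    have h3 : (pre ++ List.replicate kN r ++ rest).drop (pre.length + kN) = rest := by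
      rw [List.append_assoc, List.drop_append, List.drop_eq_nil_of_le (by omega)]
      simp
    rw [h1, h2, h3, List.map_replicate]
    exact ih (step j r)

-- L7: the i-loop fills the grid block by block
theorem outer_build (kN lN c : Nat) (vf : Nat → Nat → Int) :
    ∀ (m d : Nat) (pre : List (List Int)), pre.length = d * kN →
    (List.range' d m).foldl
      (fun res i => (List.range c).foldl
        (fun res j => (List.range kN).foldl
          (fun res t => res.set (i * kN + t)
            ((List.range lN).foldl (fun r s => r.set (j * lN + s) (vf i j))
              (res.getD (i * kN + t) []))) res) res)
      (pre ++ List.replicate (m * kN) (List.replicate (c * lN) 0))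
    = pre ++ ((List.range' d m).map (fun i => List.replicate kN
        (((List.range c).map (fun j => List.replicate lN (vf i j))).flatten))).flatten := by
  intro m
  induction m with
  | zero => intro d pre hpre; simp
  | succ m ih =>
    intro d pre hpre
    rw [List.range'_succ]
    simp only [List.foldl_cons]
    simp only [← hpre]
    rw [show (m + 1) * kN = kN + m * kN from by ring, List.replicate_add,
        ← List.append_assoc]
    rw [grid_fold kN pre (List.replicate (m * kN) (List.replicate (c * lN) 0))
        (fun j r => (List.range lN).foldl (fun r s => r.set (j * lN + s) (vf d j)) r)
        (List.range c) (List.replicate (c * lN) 0)]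
    rw [row_build lN (vf d) c]
    rw [ih (d + 1) _ (by simp [hpre]; ring)]
    simp [List.append_assoc]

theorem flatMap_const_rep {α β : Type} (xs : List α) (n : Nat) (e : β) :
    xs.flatMap (fun _ => List.replicate n e) = List.replicate (xs.length * n) e := by
  induction xs with
  | nil => simp
  | cons a t ih =>
    simp only [List.flatMap_cons, ih, List.length_cons]
    rw [Nat.succ_mul, Nat.add_comm, List.replicate_add]

-- B's port in normal form
theorem flatMap_range_getD {α β : Type} (d : α) (F : α → List β) :
    ∀ (xs : List α), xs.flatMap F = (List.range xs.length).flatMap (fun i => F (xs.getD i d)) := by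
  intro xs
  induction xs with
  | nil => simp
  | cons a t ih =>
    rw [List.flatMap_cons, ih]
    rw [List.length_cons, List.range_succ_eq_map, List.flatMap_cons, List.flatMap_map]
    simp

theorem alt_norm (M : List (List Int)) (k l : Int) :
    flower_alt M k l = (List.range M.length).flatMap (fun i => List.replicate k.toNat
      ((List.range ((PySem.List.pyGet? M 0).getD []).length).flatMap
        (fun j => List.replicate l.toNat ((M.getD i []).getD j 0)))) := by
  unfold flower_alt
  simp only [PySem.List.pyRange_one, Int.sub_zero, Int.toNat_natCast, zero_add,
    List.flatMap_map, PySem.List.foldl_append_singleton_eq_map,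
    PySem.List.foldl_append_eq_flatMap, PySem.List.pyGetD_natCast,
    List.map_const', List.length_map, List.length_range, List.nil_append]
  rw [flatMap_range_getD ([] : List Int) _ M]

-- A's port when k ≤ 0: all loops are empty and the preallocated grid itself is empty
theorem a_nonpos_k (M : List (List Int)) (k l : Int) (hk : k ≤ 0) :
    flower M k l = [] := by
  unfold flower
  have h0 : PySem.List.pyRange 0 (↑M.length * k) 1 = [] := by
    apply PySem.List.pyRange_one_eq_nil
    have : (0:Int) ≤ ↑M.length := Int.natCast_nonneg _
    nlinarith
  have hx : ∀ i : Int, PySem.List.pyRange (i * k) ((i + 1) * k) 1 = [] := by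
    intro i
    apply PySem.List.pyRange_one_eq_nil
    nlinarith [add_one_mul i k]
  simp only [h0, hx, List.foldl_nil, List.foldl_fixed]

-- A's port when 0 < k but l ≤ 0: rows of the grid are empty and stay empty
theorem a_nonpos_l (M : List (List Int)) (k l : Int) (hk : 0 < k) (hl : l ≤ 0) :
    flower M k l = List.replicate (M.length * k.toNat) [] := by
  unfold flower
  have hy : ∀ j : Int, PySem.List.pyRange (j * l) ((j + 1) * l) 1 = [] := by
    intro j
    apply PySem.List.pyRange_one_eq_nil
    nlinarith [add_one_mul j l]
  have hblank : ((↑((PySem.List.pyGet? M 0).getD []).length : Int) * l).toNat = 0 := by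
    apply Int.toNat_of_nonpos
    have : (0:Int) ≤ ↑((PySem.List.pyGet? M 0).getD []).length := Int.natCast_nonneg _
    nlinarith
  have hlen : ((↑M.length : Int) * k).toNat = M.length * k.toNat := by
    rw [← Int.toNat_of_nonneg hk.le, ← Nat.cast_mul, Int.toNat_natCast, Int.toNat_natCast]
  simp only [hy, List.foldl_nil, List.foldl_fixed, hblank, List.replicate_zero]
  simp only [PySem.List.pyRange_one, Int.sub_zero,
    PySem.List.foldl_append_singleton_eq_map, List.map_const', List.length_map,
    List.length_range, List.nil_append, hlen]

-- A's port in the same normal form, main case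
theorem a_main (M : List (List Int)) (k l : Int) (hk : 0 < k) (hl : 0 < l) :
    flower M k l = (List.range M.length).flatMap (fun i => List.replicate k.toNat
      ((List.range ((PySem.List.pyGet? M 0).getD []).length).flatMap
        (fun j => List.replicate l.toNat ((M.getD i []).getD j 0)))) := by
  obtain ⟨kN, rfl⟩ : ∃ kN : Nat, k = ↑kN := ⟨k.toNat, (Int.toNat_of_nonneg hk.le).symm⟩
  obtain ⟨lN, rfl⟩ : ∃ lN : Nat, l = ↑lN := ⟨l.toNat, (Int.toNat_of_nonneg hl.le).symm⟩
  unfold flower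
  have hxb : ∀ a : Int, (a + 1) * (kN : Int) - a * (kN : Int) = (kN : Int) := by
    intro a; ring
  have hyb : ∀ a : Int, (a + 1) * (lN : Int) - a * (lN : Int) = (lN : Int) := by
    intro a; ring
  simp only [PySem.List.pyRange_one, Int.sub_zero, zero_add, hxb, hyb,
    ← Nat.cast_mul, Int.toNat_natCast, List.foldl_map,
    PySem.List.foldl_append_singleton_eq_map, List.map_const',
    List.length_range, List.nil_append,
    ← Nat.cast_add, PySem.List.pySetD_natCast, PySem.List.pyGetD_natCast]
  simp only [foldl_row_factor]
  have ob := outer_build kN lN ((PySem.List.pyGet? M 0).getD []).length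
      (fun i j => (M.getD i []).getD j 0) M.length 0 [] (by simp)
  rw [← List.range_eq_range'] at ob
  simp only [List.nil_append] at ob
  rw [ob]
  simp only [List.flatMap_def]

theorem flower_eq (M : List (List Int)) (k l : Int) : flower M k l = flower_alt M k l := by
  rw [alt_norm]
  by_cases hk : k ≤ 0
  · rw [a_nonpos_k M k l hk, Int.toNat_of_nonpos hk]
    simp
  by_cases hl : l ≤ 0
  · rw [a_nonpos_l M k l (by omega) hl, Int.toNat_of_nonpos hl]
    simp only [List.replicate_zero]
    rw [show (fun i => List.replicate k.toNat
        ((List.range ((PySem.List.pyGet? M 0).getD []).length).flatMap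
          (fun j => ([] : List Int)))) = fun _ => List.replicate k.toNat [] from by
      funext i; simp]
    rw [flatMap_const_rep, List.length_range]
  · exact a_main M k l (by omega) (by omega)


-- ===== VERDICT (by name: the statement is the Claim_ definition above) =====
theorem flower_spec : Claim_equal_flower := by
  intro M k l _ _
  unfold Spec_flower
  exact flower_eq M k l
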